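-- pv_equiv track=rewrite | github.com/cycoders/code | binary-diff-cli/src/binary_diff_cli/renderer.py | highlight_hex
-- ===== SOURCE A (Python) =====
-- from typing import List
--
-- Markup = str
--
-- def highlight_hex(hex_str: str, diff_pos: List[int]) -> Markup:
--     """
--     Highlight changed bytes in hex string with Rich markup.
--
--     e.g. '00 11 ff' -> '[bold red on yellow]ff[/]'
--     """
--     parts = hex_str.split(" ")
--     highlighted_parts = []
--     for i, part in enumerate(parts):
--         if i in diff_pos:
--             highlighted_parts.append(f"[bold red on yellow]{part}[/]" )
--         else:
--             highlighted_parts.append(part)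
--     return " ".join(highlighted_parts)
-- ===== SOURCE B (Python) =====
-- from typing import List
--
-- Markup = str
--
-- def highlight_hex(hex_str: str, diff_pos: List[int]) -> Markup:
--     parts = hex_str.split(" ")
--     n = len(parts)
--     for pos in set(diff_pos):
--         if 0 <= pos < n:
--             parts[pos] = f"[bold red on yellow]{parts[pos]}[/]"
--     return " ".join(parts)
-- ===== Notes on version B (the rewrite author's own statement) =====
-- stated objective: alternative
-- what changed: B iterates over the (deduplicated) diff positions and updates parts in place with a range guard, instead of scanning every part and testing membership in diff_pos.
import Mathlib
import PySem

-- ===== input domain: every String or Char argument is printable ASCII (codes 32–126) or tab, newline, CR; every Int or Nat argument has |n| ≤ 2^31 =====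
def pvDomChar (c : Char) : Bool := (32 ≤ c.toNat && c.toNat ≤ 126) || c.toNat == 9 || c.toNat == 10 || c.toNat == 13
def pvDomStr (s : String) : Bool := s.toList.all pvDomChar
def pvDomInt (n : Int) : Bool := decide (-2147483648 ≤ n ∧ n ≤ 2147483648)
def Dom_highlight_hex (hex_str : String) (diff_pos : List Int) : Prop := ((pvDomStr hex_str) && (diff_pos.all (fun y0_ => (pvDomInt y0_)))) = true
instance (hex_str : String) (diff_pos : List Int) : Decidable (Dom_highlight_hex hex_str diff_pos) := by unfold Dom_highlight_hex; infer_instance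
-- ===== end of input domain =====

-- B iterates over the deduplicated diff positions updating the parts list in place
-- (with a range guard), instead of scanning every part and testing membership; alternative decomposition.

-- ===== PORT A =====
def highlight_hex (hex_str : String) (diff_pos : List Int) : String :=
  let parts := (PySem.Str.split? hex_str " ").getD []
  let highlighted_parts :=
    (PySem.List.enumerate parts).foldl
      (fun acc ip =>
        if ip.1 ∈ diff_pos then acc ++ ["[bold red on yellow]" ++ ip.2 ++ "[/]"]
        else acc ++ [ip.2]) []
  PySem.Str.join " " highlighted_parts

-- ===== PORT B =====
def highlight_hex_alt (hex_str : String) (diff_pos : List Int) : String :=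
  let parts := (PySem.Str.split? hex_str " ").getD []
  let n : Int := parts.length
  let parts' :=
    (PySem.Set.ofList diff_pos).foldl
      (fun ps pos =>
        if 0 ≤ pos ∧ pos < n then
          PySem.List.pySetD ps pos ("[bold red on yellow]" ++ PySem.List.pyGetD ps pos "" ++ "[/]")
        else ps) parts
  PySem.Str.join " " parts'

-- ===== PRECONDITION & SPEC =====
def Spec_highlight_hex (hex_str : String) (diff_pos : List Int) (out : String) : Prop := out = highlight_hex_alt hex_str diff_pos
instance (hex_str : String) (diff_pos : List Int) (out : String) : Decidable (Spec_highlight_hex hex_str diff_pos out) := by unfold Spec_highlight_hex; infer_instance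

-- ===== CLAIM (what is proved, stated in full; the proofs are below) =====
def Claim_equal_highlight_hex : Prop := ∀ (hex_str : String) (diff_pos : List Int), Dom_highlight_hex hex_str diff_pos → Spec_highlight_hex hex_str diff_pos (highlight_hex hex_str diff_pos)

-- ===== LEMMAS AND PROOFS =====

-- A's loop: append-in-both-branches fold is a map over the enumeration.
theorem foldl_append_if_else (dp : List Int) (l : List (Int × String)) (acc : List String) :
    l.foldl (fun acc ip => if ip.1 ∈ dp then acc ++ ["[bold red on yellow]" ++ ip.2 ++ "[/]"] else acc ++ [ip.2]) acc
      = acc ++ l.map (fun ip => if ip.1 ∈ dp then "[bold red on yellow]" ++ ip.2 ++ "[/]" else ip.2) := by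
  induction l generalizing acc with
  | nil => simp
  | cons x xs ih => by_cases h : x.1 ∈ dp <;> simp [h, ih]

-- B's loop, elementwise: folding updates over a duplicate-free position list wraps each slot at most once.
theorem foldl_update_getElem? (wrap : String → String)
    (S : List Int) (orig : List String) (n : Int) (hS : S.Nodup) (hn : n = (orig.length : Int)) (j : Nat) :
    (S.foldl
      (fun ps pos =>
        if 0 ≤ pos ∧ pos < n then
          PySem.List.pySetD ps pos (wrap (PySem.List.pyGetD ps pos ""))
        else ps) orig)[j]?
      = orig[j]?.map (fun x => if (j : Int) ∈ S then wrap x else x) := by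
  induction S generalizing orig n with
  | nil =>
    rcases h : orig[j]? with _ | x <;> simp [h]
  | cons pos rest ih =>
    simp only [List.foldl_cons]
    have hnd := List.nodup_cons.mp hS
    by_cases hr : 0 ≤ pos ∧ pos < n
    · simp only [if_pos hr]
      have hlt : pos.toNat < orig.length := by omega
      rw [PySem.List.pySetD_of_nonneg orig _ hr.1]
      rw [ih (orig.set pos.toNat (wrap (PySem.List.pyGetD orig pos ""))) n hnd.2 (by simpa using hn)]
      by_cases hj : (j : Int) = pos
      · have hjt : pos.toNat = j := by omega
        have hjlt : j < orig.length := by omega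
        have hjn : (j : Int) ∉ rest := by rw [hj]; exact hnd.1
        have hget : PySem.List.pyGetD orig pos "" = orig[j] := by
          rw [show pos = ((j : Nat) : Int) by omega, PySem.List.pyGetD_natCast,
            List.getD_eq_getElem?_getD, List.getElem?_eq_getElem hjlt]
          rfl
        simp [hjt, hj, hjlt, hget, hnd.1]
      · have hne : pos.toNat ≠ j := by omega
        have hset : (orig.set pos.toNat (wrap (PySem.List.pyGetD orig pos "")))[j]? = orig[j]? := by
          rw [List.getElem?_set]; simp [hne]
        rw [hset]
        rcases h : orig[j]? with _ | x <;> simp [hj]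
    · simp only [if_neg hr]
      rw [ih orig n hnd.2 hn]
      by_cases hj : (j : Int) = pos
      · rcases hjo : orig[j]? with _ | x
        · simp
        · have hjlt : j < orig.length := (List.getElem?_eq_some_iff.mp hjo).1
          exfalso; exact hr ⟨by omega, by omega⟩
      · rcases h : orig[j]? with _ | x <;> simp [hj]

theorem highlight_hex_lists (hex_str : String) (diff_pos : List Int) :
    highlight_hex hex_str diff_pos = highlight_hex_alt hex_str diff_pos := by
  simp only [highlight_hex, highlight_hex_alt]
  congr 1
  rw [foldl_append_if_else diff_pos]
  apply List.ext_getElem?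
  intro j
  rw [foldl_update_getElem? (fun s => "[bold red on yellow]" ++ s ++ "[/]")
      (PySem.Set.ofList diff_pos) ((PySem.Str.split? hex_str " ").getD [])
      (((PySem.Str.split? hex_str " ").getD []).length : Int)
      (PySem.Set.nodup_ofList diff_pos) rfl j]
  simp only [List.nil_append, List.getElem?_map, PySem.List.getElem?_enumerate, zero_add]
  rcases hjo : ((PySem.Str.split? hex_str " ").getD [])[j]? with _ | x
  · simp
  · simp only [Option.map_some]
    by_cases h : (j : Int) ∈ diff_pos <;>
      simp [h, PySem.Set.mem_ofList]

-- ===== VERDICT (by name: the statement is the Claim_ definition above) =====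
theorem highlight_hex_spec : Claim_equal_highlight_hex := by
  intro hex_str diff_pos _
  unfold Spec_highlight_hex
  exact highlight_hex_lists hex_str diff_pos
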